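-- pv_equiv track=rewrite | github.com/MarielaCarlita/M | codigo2.py | divide_by_dimension
-- ===== SOURCE A (Python) =====
-- def dimen(simplex):
--     return len(simplex)-1
--
-- def divide_by_dimension(simplexwise_filtration):
--     filtration_by_dimension = []
--     p_simplices = []
--     for i in range(len(simplexwise_filtration)-1):
--         p_simplices.append(simplexwise_filtration[i].copy())
--         if dimen(simplexwise_filtration[i]) != dimen(simplexwise_filtration[i+1]):
--             filtration_by_dimension.append(p_simplices.copy())
--             p_simplices = []
--     p_simplices.append(simplexwise_filtration[-1].copy())
--     filtration_by_dimension.append(p_simplices.copy())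
--     return filtration_by_dimension
-- ===== SOURCE B (Python) =====
-- def dimen(simplex):
--     return len(simplex)-1
--
-- def divide_by_dimension(simplexwise_filtration):
--     n = len(simplexwise_filtration)
--     if n == 0:
--         return []
--     dims = [dimen(s) for s in simplexwise_filtration]
--     bounds = [0] + [i + 1 for i in range(n - 1) if dims[i] != dims[i + 1]] + [n]
--     return [[s.copy() for s in simplexwise_filtration[a:b]]
--             for a, b in zip(bounds, bounds[1:])]
-- ===== Notes on version B (the rewrite author's own statement) =====
-- stated objective: alternative
-- what changed: A builds groups with a single accumulator loop that flushes on each dimension change; B first computes the dimension-key list, collects the boundary indices where adjacent dimensions differ, and slices the input at those boundaries.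
import Mathlib
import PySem

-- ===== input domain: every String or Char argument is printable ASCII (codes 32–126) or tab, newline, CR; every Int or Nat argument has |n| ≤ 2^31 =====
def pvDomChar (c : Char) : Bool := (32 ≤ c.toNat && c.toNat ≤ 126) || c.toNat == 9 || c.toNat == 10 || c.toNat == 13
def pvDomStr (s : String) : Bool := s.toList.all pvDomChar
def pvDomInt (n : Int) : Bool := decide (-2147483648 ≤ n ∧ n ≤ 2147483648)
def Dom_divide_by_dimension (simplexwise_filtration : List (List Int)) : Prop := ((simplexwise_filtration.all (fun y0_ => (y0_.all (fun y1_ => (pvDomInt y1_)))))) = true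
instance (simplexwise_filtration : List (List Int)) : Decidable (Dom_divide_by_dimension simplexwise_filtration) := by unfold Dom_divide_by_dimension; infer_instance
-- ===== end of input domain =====

-- B replaces A's accumulator loop by a two-pass boundaries-then-slice decomposition (objective: alternative); Python's .copy() is identity on Lean's immutable lists.

-- ===== PORT A =====
def dimen (simplex : List Int) : Int := (simplex.length : Int) - 1

def divide_by_dimension (simplexwise_filtration : List (List Int)) : List (List (List Int)) :=
  -- loop indices i and i+1 are always in range, so pyGetD's default is never read;
  -- the final simplexwise_filtration[-1] raises IndexError on [], excluded by Pre_.
  let st := (PySem.List.pyRange 0 ((simplexwise_filtration.length : Int) - 1) 1).foldl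
    (fun (st : List (List (List Int)) × List (List Int)) i =>
      let p := st.2 ++ [PySem.List.pyGetD simplexwise_filtration i []]
      if dimen (PySem.List.pyGetD simplexwise_filtration i []) ≠
         dimen (PySem.List.pyGetD simplexwise_filtration (i+1) []) then
        (st.1 ++ [p], ([] : List (List Int)))
      else (st.1, p)) ([], [])
  st.1 ++ [st.2 ++ [PySem.List.pyGetD simplexwise_filtration (-1) []]]

-- ===== PORT B =====
def divide_by_dimension_alt (simplexwise_filtration : List (List Int)) : List (List (List Int)) :=
  let n : Int := (simplexwise_filtration.length : Int)
  if simplexwise_filtration.length = 0 then []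
  else
    let dims := simplexwise_filtration.map dimen
    let bounds := 0 :: ((((PySem.List.pyRange 0 (n - 1) 1).filter
        (fun i => decide (PySem.List.pyGetD dims i 0 ≠ PySem.List.pyGetD dims (i+1) 0))).map
        (fun i => i + 1)) ++ [n])
    (bounds.zip bounds.tail).map
      (fun ab => (PySem.List.slice simplexwise_filtration (some ab.1) (some ab.2)).map id)

-- ===== PRECONDITION & SPEC =====
-- Python A evaluates simplexwise_filtration[-1], which raises IndexError on the empty list.
def Pre_divide_by_dimension (simplexwise_filtration : List (List Int)) : Prop :=
  simplexwise_filtration ≠ []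
instance (simplexwise_filtration : List (List Int)) : Decidable (Pre_divide_by_dimension simplexwise_filtration) := by unfold Pre_divide_by_dimension; infer_instance
def pvWitness_divide_by_dimension : List (List Int) := [[1], [2], [1, 2]]

def Spec_divide_by_dimension (simplexwise_filtration : List (List Int)) (out : List (List (List Int))) : Prop := out = divide_by_dimension_alt simplexwise_filtration
instance (simplexwise_filtration : List (List Int)) (out : List (List (List Int))) : Decidable (Spec_divide_by_dimension simplexwise_filtration out) := by unfold Spec_divide_by_dimension; infer_instance

-- ===== CLAIM (what is proved, stated in full; the proofs are below) =====
def Claim_equal_divide_by_dimension : Prop := ∀ (simplexwise_filtration : List (List Int)), Dom_divide_by_dimension simplexwise_filtration → Pre_divide_by_dimension simplexwise_filtration → Spec_divide_by_dimension simplexwise_filtration (divide_by_dimension simplexwise_filtration)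

-- ===== LEMMAS AND PROOFS =====

-- the consecutive-dimension grouping both programs compute, as structural recursion
def chunk : List (List Int) → List (List (List Int))
  | [] => []
  | [x] => [[x]]
  | x :: y :: t =>
    if dimen x ≠ dimen y then [x] :: chunk (y :: t)
    else match chunk (y :: t) with
         | g :: gs => (x :: g) :: gs
         | [] => [[x]]

lemma chunk_ne_nil (x : List Int) (t : List (List Int)) : chunk (x :: t) ≠ [] := by
  cases t with
  | nil => simp [chunk]
  | cons y t =>
    rw [chunk]
    split_ifs
    · simp
    · cases h : chunk (y :: t) <;> simp

lemma chunk_cons_ex (x : List Int) (t : List (List Int)) :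
    ∃ g gs, chunk (x :: t) = g :: gs := by
  cases h : chunk (x :: t) with
  | nil => exact absurd h (chunk_ne_nil x t)
  | cons g gs => exact ⟨g, gs, rfl⟩

lemma pyGetD_cons_add_one {α : Type} (x : α) (r : List α) (k : Int) (hk : 0 ≤ k) (d : α) :
    PySem.List.pyGetD (x :: r) (k + 1) d = PySem.List.pyGetD r k d := by
  obtain ⟨n, rfl⟩ := Int.eq_ofNat_of_zero_le hk
  have h : ((n : Int) + 1) = ((n + 1 : Nat) : Int) := by push_cast; ring
  rw [h, PySem.List.pyGetD_natCast, PySem.List.pyGetD_natCast, List.getD_cons_succ]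

lemma pyRange_shift (m : Nat) :
    PySem.List.pyRange 1 ((m : Int) + 1) 1 = (PySem.List.pyRange 0 ((m : Int)) 1).map (· + 1) := by
  rw [PySem.List.pyRange_one, PySem.List.pyRange_one, List.map_map]
  have e1 : ((m : Int) + 1 - 1).toNat = m := by omega
  have e2 : ((m : Int) - 0).toNat = m := by omega
  rw [e1, e2]
  apply List.map_congr_left
  intro k _
  simp only [Function.comp_apply]
  omega

-- A's fold over range(len-1) with adjacent indexing = a fold over adjacent pairs
lemma foldl_range_pairs :
    ∀ (l : List (List Int)) (s : List (List (List Int)) × List (List Int)),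
    ((PySem.List.pyRange 0 ((l.length : Int) - 1) 1).foldl
      (fun st i =>
        if dimen (PySem.List.pyGetD l i []) ≠ dimen (PySem.List.pyGetD l (i+1) []) then
          (st.1 ++ [st.2 ++ [PySem.List.pyGetD l i []]], ([] : List (List Int)))
        else (st.1, st.2 ++ [PySem.List.pyGetD l i []])) s)
    = (l.zip l.tail).foldl
        (fun st q =>
          if dimen q.1 ≠ dimen q.2 then (st.1 ++ [st.2 ++ [q.1]], ([] : List (List Int)))
          else (st.1, st.2 ++ [q.1])) s := by
  intro l
  induction l with
  | nil => intro s; rw [PySem.List.pyRange_one_eq_nil (by simp)]; rfl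
  | cons x r ih =>
    intro s
    cases r with
    | nil => rw [PySem.List.pyRange_one_eq_nil (by simp)]; rfl
    | cons y t =>
      have hlen : (((x :: y :: t).length : Int) - 1) = ((t.length : Int) + 1) := by
        push_cast [List.length_cons]; ring
      rw [hlen, PySem.List.pyRange_one_cons (by positivity), List.foldl_cons]
      have h0 : PySem.List.pyGetD (x :: y :: t) 0 ([] : List Int) = x :=
        PySem.List.pyGetD_zero_cons x (y :: t) []
      have h1 : PySem.List.pyGetD (x :: y :: t) (0 + 1) ([] : List Int) = y := by
        rw [pyGetD_cons_add_one x (y :: t) 0 le_rfl, PySem.List.pyGetD_zero_cons]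
      simp only [h0, h1]
      rw [show (0 : Int) + 1 = 1 from by norm_num, pyRange_shift t.length, List.foldl_map]
      have hbody : ∀ (st : List (List (List Int)) × List (List Int)),
          ∀ i ∈ PySem.List.pyRange 0 ((t.length : Int)) 1,
          (if dimen (PySem.List.pyGetD (x :: y :: t) (i + 1) []) ≠
              dimen (PySem.List.pyGetD (x :: y :: t) (i + 1 + 1) []) then
             (st.1 ++ [st.2 ++ [PySem.List.pyGetD (x :: y :: t) (i + 1) []]], ([] : List (List Int)))
           else (st.1, st.2 ++ [PySem.List.pyGetD (x :: y :: t) (i + 1) []]))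
          = (if dimen (PySem.List.pyGetD (y :: t) i []) ≠
                dimen (PySem.List.pyGetD (y :: t) (i + 1) []) then
               (st.1 ++ [st.2 ++ [PySem.List.pyGetD (y :: t) i []]], ([] : List (List Int)))
             else (st.1, st.2 ++ [PySem.List.pyGetD (y :: t) i []])) := by
        intro st i hi
        have hi0 : 0 ≤ i := (PySem.List.mem_pyRange_one.mp hi).1
        rw [pyGetD_cons_add_one x (y :: t) i hi0,
            show i + 1 + 1 = (i + 1) + 1 from by ring,
            pyGetD_cons_add_one x (y :: t) (i + 1) (by omega)]
      rw [PySem.List.foldl_congr_mem _ _ _ _ hbody,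
          show ((t.length : Int)) = (((y :: t).length : Int) - 1) from by
            push_cast [List.length_cons]; ring,
          ih]
      simp only [List.tail_cons, List.zip_cons_cons, List.foldl_cons]

-- the A-loop result with a running group prefix
def chunkP (p : List (List Int)) (l : List (List Int)) : List (List (List Int)) :=
  match chunk l with
  | g :: gs => (p ++ g) :: gs
  | [] => [p]

lemma A_loop_chunk :
    ∀ (l : List (List Int)) (x : List Int) (acc : List (List (List Int))) (p : List (List Int)),
    (((x :: l).zip l).foldl
        (fun (st : List (List (List Int)) × List (List Int)) q =>
          if dimen q.1 ≠ dimen q.2 then (st.1 ++ [st.2 ++ [q.1]], ([] : List (List Int)))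
          else (st.1, st.2 ++ [q.1]))
        (acc, p)).1 ++
      [(((x :: l).zip l).foldl
        (fun (st : List (List (List Int)) × List (List Int)) q =>
          if dimen q.1 ≠ dimen q.2 then (st.1 ++ [st.2 ++ [q.1]], ([] : List (List Int)))
          else (st.1, st.2 ++ [q.1]))
        (acc, p)).2 ++ [(x :: l).getLast (by simp)]]
    = acc ++ chunkP p (x :: l) := by
  intro l
  induction l with
  | nil =>
    intro x acc p
    simp [chunkP, chunk]
  | cons y t ih =>
    intro x acc p
    simp only [List.zip_cons_cons, List.foldl_cons]
    have hlast : (x :: y :: t).getLast (by simp) = (y :: t).getLast (by simp) :=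
      List.getLast_cons (by simp)
    obtain ⟨g, gs, hg⟩ := chunk_cons_ex y t
    by_cases hd : dimen x ≠ dimen y
    · simp only [if_pos hd]
      rw [hlast, ih y (acc ++ [p ++ [x]]) []]
      have hcx : chunk (x :: y :: t) = [x] :: g :: gs := by
        rw [chunk, if_pos hd, hg]
      simp [chunkP, hg, hcx]
    · simp only [if_neg hd]
      rw [hlast, ih y acc (p ++ [x])]
      have hcx : chunk (x :: y :: t) = (x :: g) :: gs := by
        rw [chunk, if_neg hd, hg]
      simp [chunkP, hg, hcx]

lemma A_eq_chunk (x : List Int) (r : List (List Int)) :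
    divide_by_dimension (x :: r) = chunk (x :: r) := by
  unfold divide_by_dimension
  show ((PySem.List.pyRange 0 ((((x :: r).length : Int)) - 1) 1).foldl
      (fun (st : List (List (List Int)) × List (List Int)) i =>
        if dimen (PySem.List.pyGetD (x :: r) i []) ≠ dimen (PySem.List.pyGetD (x :: r) (i+1) []) then
          (st.1 ++ [st.2 ++ [PySem.List.pyGetD (x :: r) i []]], ([] : List (List Int)))
        else (st.1, st.2 ++ [PySem.List.pyGetD (x :: r) i []])) ([], [])).1 ++
    [((PySem.List.pyRange 0 ((((x :: r).length : Int)) - 1) 1).foldl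
      (fun (st : List (List (List Int)) × List (List Int)) i =>
        if dimen (PySem.List.pyGetD (x :: r) i []) ≠ dimen (PySem.List.pyGetD (x :: r) (i+1) []) then
          (st.1 ++ [st.2 ++ [PySem.List.pyGetD (x :: r) i []]], ([] : List (List Int)))
        else (st.1, st.2 ++ [PySem.List.pyGetD (x :: r) i []])) ([], [])).2 ++
      [PySem.List.pyGetD (x :: r) (-1) []]] = chunk (x :: r)
  rw [foldl_range_pairs, PySem.List.pyGetD_neg_one (x :: r) [] (by simp)]
  simp only [List.tail_cons]
  rw [A_loop_chunk r x [] []]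
  obtain ⟨g, gs, hg⟩ := chunk_cons_ex x r
  simp [chunkP, hg]

-- ===== B side =====

-- the boundary positions and bounds B computes
def bpos (l : List (List Int)) : List Int :=
  ((PySem.List.pyRange 0 ((l.length : Int) - 1) 1).filter
    (fun i => decide (PySem.List.pyGetD (l.map dimen) i 0 ≠ PySem.List.pyGetD (l.map dimen) (i+1) 0))).map
    (fun i => i + 1)

def bnds (l : List (List Int)) : List Int := bpos l ++ [(l.length : Int)]

lemma mem_bpos_one_le (l : List (List Int)) : ∀ b ∈ bpos l, 1 ≤ b := by
  intro b hb
  obtain ⟨i, hi, rfl⟩ := List.mem_map.mp hb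
  have := (PySem.List.mem_pyRange_one.mp (List.mem_of_mem_filter hi)).1
  omega

lemma mem_bnds_nonneg (l : List (List Int)) : ∀ b ∈ bnds l, 0 ≤ b := by
  intro b hb
  rcases List.mem_append.mp hb with h | h
  · have := mem_bpos_one_le l b h; omega
  · simp only [List.mem_singleton] at h; omega

lemma bnds_ne_nil (l : List (List Int)) : bnds l ≠ [] := by
  unfold bnds; simp

lemma bpos_cons (x y : List Int) (t : List (List Int)) :
    bpos (x :: y :: t) = (if dimen x ≠ dimen y then [(1 : Int)] else []) ++ (bpos (y :: t)).map (· + 1) := by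
  unfold bpos
  have hlen : (((x :: y :: t).length : Int) - 1) = ((t.length : Int) + 1) := by
    push_cast [List.length_cons]; ring
  rw [hlen, PySem.List.pyRange_one_cons (by positivity), List.filter_cons]
  have h0 : PySem.List.pyGetD ((x :: y :: t).map dimen) 0 0 = dimen x := by
    rw [List.map_cons]; exact PySem.List.pyGetD_zero_cons _ _ _
  have h1 : PySem.List.pyGetD ((x :: y :: t).map dimen) (0 + 1) 0 = dimen y := by
    rw [List.map_cons, pyGetD_cons_add_one _ _ 0 le_rfl, List.map_cons,
        PySem.List.pyGetD_zero_cons]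
  simp only [h0, h1]
  rw [show (0 : Int) + 1 = 1 from by norm_num, pyRange_shift t.length, List.filter_map]
  have hpred : ∀ i ∈ PySem.List.pyRange 0 ((t.length : Int)) 1,
      (((fun i => decide (PySem.List.pyGetD ((x :: y :: t).map dimen) i 0 ≠
                 PySem.List.pyGetD ((x :: y :: t).map dimen) (i+1) 0)) ∘ (· + 1)) i)
      = (decide (PySem.List.pyGetD ((y :: t).map dimen) i 0 ≠
                 PySem.List.pyGetD ((y :: t).map dimen) (i + 1) 0)) := by
    intro i hi
    have hi0 : 0 ≤ i := (PySem.List.mem_pyRange_one.mp hi).1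
    simp only [Function.comp_apply, List.map_cons]
    simp only [pyGetD_cons_add_one (dimen x) (dimen y :: t.map dimen) i hi0 0,
               pyGetD_cons_add_one (dimen x) (dimen y :: t.map dimen) (i + 1) (by omega) 0]
    rfl
  rw [List.filter_congr hpred,
      show ((t.length : Int)) = (((y :: t).length : Int) - 1) from by
        push_cast [List.length_cons]; ring]
  by_cases hd : dimen x ≠ dimen y
  · simp [hd, List.map_map]
  · simp [hd, List.map_map]

lemma slice_cons_shift (x : List Int) (r : List (List Int)) (a b : Int) (ha : 0 ≤ a) (hb : 0 ≤ b) :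
    PySem.List.slice (x :: r) (some (a + 1)) (some (b + 1)) = PySem.List.slice r (some a) (some b) := by
  rw [PySem.List.slice_toNat r ha hb, PySem.List.slice_toNat (x :: r) (by omega) (by omega)]
  have h1 : (a + 1).toNat = a.toNat + 1 := by omega
  have h2 : (b + 1).toNat = b.toNat + 1 := by omega
  rw [h1, h2, List.drop_succ_cons, Nat.succ_sub_succ]

lemma slice_cons_zero (x : List Int) (r : List (List Int)) (c : Int) (hc : 0 ≤ c) :
    PySem.List.slice (x :: r) (some 0) (some (c + 1)) = x :: PySem.List.slice r (some 0) (some c) := by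
  rw [PySem.List.slice_toNat r le_rfl hc, PySem.List.slice_toNat (x :: r) (by omega) (by omega)]
  have h1 : (c + 1).toNat = c.toNat + 1 := by omega
  rw [h1]
  simp

lemma segs_chunk :
    ∀ (t : List (List Int)) (x : List Int),
    ((0 :: bnds (x :: t)).zip (bnds (x :: t))).map
      (fun ab => PySem.List.slice (x :: t) (some ab.1) (some ab.2)) = chunk (x :: t) := by
  intro t
  induction t with
  | nil =>
    intro x
    have hb : bnds [x] = [(1 : Int)] := by
      unfold bnds bpos
      rw [PySem.List.pyRange_one_eq_nil (by norm_num)]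
      norm_num
    rw [hb]
    have hs : PySem.List.slice [x] (some 0) (some 1) = [x] := by
      rw [PySem.List.slice_toNat [x] le_rfl (by norm_num)]; rfl
    simp [chunk, hs]
  | cons y tt ih =>
    intro x
    have hn : ((x :: y :: tt).length : Int) = ((y :: tt).length : Int) + 1 := by
      push_cast [List.length_cons]; ring
    have hbnds : bnds (x :: y :: tt)
        = (if dimen x ≠ dimen y then [(1 : Int)] else []) ++ (bnds (y :: tt)).map (· + 1) := by
      unfold bnds
      rw [bpos_cons, hn]
      split_ifs <;> simp
    have hcs0 : ∀ b ∈ bnds (y :: tt), 0 ≤ b := mem_bnds_nonneg _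
    by_cases hd : dimen x ≠ dimen y
    · rw [hbnds, if_pos hd]
      simp only [List.singleton_append]
      rw [List.zip_cons_cons, List.map_cons]
      rw [show ((1 : Int) :: (bnds (y :: tt)).map (· + 1)) = (0 :: bnds (y :: tt)).map (· + 1)
            from by simp,
          List.zip_map, List.map_map]
      rw [show chunk (x :: y :: tt) = [x] :: chunk (y :: tt) from by rw [chunk, if_pos hd]]
      refine congrArg₂ (· :: ·) ?_ ?_
      · show PySem.List.slice (x :: y :: tt) (some 0) (some 1) = [x]
        rw [PySem.List.slice_toNat (x :: y :: tt) le_rfl (by norm_num)]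
        rfl
      · rw [← ih y]
        apply List.map_congr_left
        intro ab hab
        obtain ⟨hm1, hm2⟩ := List.of_mem_zip (a := ab.1) (b := ab.2) (by simpa using hab)
        have ha1 : 0 ≤ ab.1 := by
          rcases List.mem_cons.mp hm1 with h | h
          · omega
          · exact hcs0 _ h
        have ha2 : 0 ≤ ab.2 := hcs0 _ hm2
        simp only [Function.comp_apply, Prod.map_fst, Prod.map_snd]
        exact slice_cons_shift x (y :: tt) ab.1 ab.2 ha1 ha2
    · rw [hbnds, if_neg hd]
      simp only [List.nil_append]
      obtain ⟨c, cs', hcs⟩ : ∃ c cs', bnds (y :: tt) = c :: cs' := by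
        cases h : bnds (y :: tt) with
        | nil => exact absurd h (bnds_ne_nil _)
        | cons c cs' => exact ⟨c, cs', rfl⟩
      have hc0 : 0 ≤ c := hcs0 c (by rw [hcs]; simp)
      rw [hcs, List.map_cons, List.zip_cons_cons, List.map_cons]
      rw [show ((c + 1) :: cs'.map (· + 1)) = ((c :: cs').map (· + 1)) from by simp,
          List.zip_map, List.map_map]
      have hih := ih y
      rw [hcs, List.zip_cons_cons, List.map_cons] at hih
      obtain ⟨g, gs, hg⟩ := chunk_cons_ex y tt
      rw [hg] at hih
      have hg1 : PySem.List.slice (y :: tt) (some (0, c).1) (some (0, c).2) = g :=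
        (List.cons.injEq _ _ _ _ ▸ hih).1
      have hg2 : ((c :: cs').zip cs').map
          (fun ab => PySem.List.slice (y :: tt) (some ab.1) (some ab.2)) = gs :=
        (List.cons.injEq _ _ _ _ ▸ hih).2
      rw [show chunk (x :: y :: tt) = (x :: g) :: gs from by rw [chunk, if_neg hd, hg]]
      refine congrArg₂ (· :: ·) ?_ ?_
      · show PySem.List.slice (x :: y :: tt) (some 0) (some (c + 1)) = x :: g
        rw [slice_cons_zero x (y :: tt) c hc0]
        exact congrArg _ hg1
      · rw [← hg2]
        apply List.map_congr_left
        intro ab hab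
        obtain ⟨hm1, hm2⟩ := List.of_mem_zip (a := ab.1) (b := ab.2) (by simpa using hab)
        have ha1 : 0 ≤ ab.1 := hcs0 _ (by rw [hcs]; exact hm1)
        have ha2 : 0 ≤ ab.2 := hcs0 _ (by rw [hcs]; exact List.mem_cons_of_mem _ hm2)
        simp only [Function.comp_apply, Prod.map_fst, Prod.map_snd]
        exact slice_cons_shift x (y :: tt) ab.1 ab.2 ha1 ha2

lemma B_eq_chunk (x : List Int) (t : List (List Int)) :
    divide_by_dimension_alt (x :: t) = chunk (x :: t) := by
  unfold divide_by_dimension_alt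
  rw [if_neg (by simp)]
  show ((0 :: bnds (x :: t)).zip ((0 :: bnds (x :: t)).tail)).map
      (fun ab => (PySem.List.slice (x :: t) (some ab.1) (some ab.2)).map id) = chunk (x :: t)
  simp only [List.tail_cons, List.map_id]
  exact segs_chunk t x

-- ===== VERDICT (by name: the statement is the Claim_ definition above) =====
theorem divide_by_dimension_spec : Claim_equal_divide_by_dimension := by
  intro l _ hpre
  unfold Spec_divide_by_dimension
  obtain ⟨x, r, rfl⟩ : ∃ x r, l = x :: r := by
    cases l with
    | nil => exact absurd rfl hpre
    | cons x r => exact ⟨x, r, rfl⟩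
  rw [A_eq_chunk, B_eq_chunk]
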